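-- pv_equiv track=rewrite | github.com/hghyhghy/Codechef-Coding-Ninja | Desktop/DSA/T77/maximumandmininksizedsubarray.py | max_and_min_in_k_subarray
-- ===== SOURCE A (Python) =====
-- def max_and_min_in_k_subarray(array:list[int],k:int)->int:
--
--     n=len(array)
--     temporary = 0
--
--     for start in range(n-k+1):
--
--         subarray = array[start:start+k]
--
--         maximum =  max(subarray)
--         minimum =  min(subarray)
--
--         temporary += maximum +minimum
--
--     return temporary
-- ===== SOURCE B (Python) =====
-- def max_and_min_in_k_subarray(array: list[int], k: int) -> int:
--     n = len(array)
--     if k > n: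
--         return 0
--     # sparse-table doubling: after the loop, maxs[i]/mins[i] hold the max/min of the
--     # length-p window starting at i; one overlapped combine yields all k-windows.
--     maxs = list(array)
--     mins = list(array)
--     p = 1
--     while 2 * p <= k:
--         maxs = list(map(max, maxs, maxs[p:]))
--         mins = list(map(min, mins, mins[p:]))
--         p *= 2
--     maxs = list(map(max, maxs, maxs[k - p:]))
--     mins = list(map(min, mins, mins[k - p:]))
--     return sum(maxs) + sum(mins)
-- ===== Notes on version B (the rewrite author's own statement) =====
-- stated objective: faster
-- what changed: Replaces A's per-window slice+max+min scan by sparse-table doubling: O(log k) rounds of offset zip-combines build the lists of all k-window maxima and minima, which are then summed.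
-- outside the precondition, e.g. on max_and_min_in_k_subarray([5, 2], 0): A raises ValueError, B returns 7
import Mathlib
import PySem

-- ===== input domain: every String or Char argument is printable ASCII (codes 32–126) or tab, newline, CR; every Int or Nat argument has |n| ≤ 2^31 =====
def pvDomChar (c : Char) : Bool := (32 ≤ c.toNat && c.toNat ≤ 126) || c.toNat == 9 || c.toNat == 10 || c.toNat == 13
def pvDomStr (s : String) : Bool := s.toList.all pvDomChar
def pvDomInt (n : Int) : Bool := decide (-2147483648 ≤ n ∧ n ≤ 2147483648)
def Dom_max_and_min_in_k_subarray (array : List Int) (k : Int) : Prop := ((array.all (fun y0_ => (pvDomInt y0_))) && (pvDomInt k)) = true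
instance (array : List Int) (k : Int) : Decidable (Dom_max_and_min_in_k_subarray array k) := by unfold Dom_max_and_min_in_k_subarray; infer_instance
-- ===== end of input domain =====

-- B replaces A's per-window slice+max+min scan by sparse-table doubling (window maxima/minima
-- lists combined with doubling offsets, one overlapped combine at the end): a different,
-- asymptotically faster algorithm.

-- ===== PORT A =====
def max_and_min_in_k_subarray (array : List Int) (k : Int) : Int :=
  let n : Int := array.length
  (PySem.List.pyRange 0 (n - k + 1) 1).foldl (fun temporary start =>
    let subarray := PySem.List.slice array (some start) (some (start + k))
    -- max([]) / min([]) raise ValueError; Pre_ (1 ≤ k) excludes that, so .getD 0 is never taken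
    let maximum := (PySem.List.max? subarray (fun y => y)).getD 0
    let minimum := (PySem.List.min? subarray (fun y => y)).getD 0
    temporary + (maximum + minimum)) 0

-- ===== PORT B =====
-- the doubling loop 'while 2 * p <= k: maxs = map(max, maxs, maxs[p:]); … ; p *= 2'
-- (the '0 < p' conjunct only makes termination evident: B always starts the loop at p = 1,
-- and for p ≥ 1 the guard is exactly Python's '2 * p <= k')
def pvGrow (kk : Nat) (maxs mins : List Int) (p : Nat) : List Int × List Int × Nat :=
  if h : 2 * p ≤ kk ∧ 0 < p then
    pvGrow kk (List.zipWith max maxs (maxs.drop p)) (List.zipWith min mins (mins.drop p)) (2 * p)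
  else (maxs, mins, p)
termination_by kk - p
decreasing_by omega

def max_and_min_in_k_subarray_alt (array : List Int) (k : Int) : Int :=
  let n : Int := array.length
  if k > n then 0
  else
    let r := pvGrow k.toNat array array 1
    let p := r.2.2
    -- maxs[k - p:] is a Python slice (k - p may be negative outside Pre_): exact via PySem.List.slice
    let maxs := List.zipWith max r.1 (PySem.List.slice r.1 (some (k - (p : Int))) none)
    let mins := List.zipWith min r.2.1 (PySem.List.slice r.2.1 (some (k - (p : Int))) none)
    maxs.sum + mins.sum

-- ===== PRECONDITION & SPEC =====
-- Pre_ excludes k ≤ 0, where every slice is empty and A's max([]) raises ValueError.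
def Pre_max_and_min_in_k_subarray (array : List Int) (k : Int) : Prop := 1 ≤ k
instance (array : List Int) (k : Int) : Decidable (Pre_max_and_min_in_k_subarray array k) := by unfold Pre_max_and_min_in_k_subarray; infer_instance
def pvWitness_max_and_min_in_k_subarray : List Int × Int := ([3, 1, 4, 1, 5], 2)

def Spec_max_and_min_in_k_subarray (array : List Int) (k : Int) (out : Int) : Prop := out = max_and_min_in_k_subarray_alt array k
instance (array : List Int) (k : Int) (out : Int) : Decidable (Spec_max_and_min_in_k_subarray array k out) := by unfold Spec_max_and_min_in_k_subarray; infer_instance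

-- ===== CLAIM (what is proved, stated in full; the proofs are below) =====
def Claim_equal_max_and_min_in_k_subarray : Prop := ∀ (array : List Int) (k : Int), Dom_max_and_min_in_k_subarray array k → Pre_max_and_min_in_k_subarray array k → Spec_max_and_min_in_k_subarray array k (max_and_min_in_k_subarray array k)

-- ===== LEMMAS AND PROOFS =====

-- fold of a nonempty list (Python max/min of a list), 0 on []
def pvNfold (g : Int → Int → Int) : List Int → Int
  | [] => 0
  | x :: t => t.foldl g x

-- the list of g-folds of all windows of length p
def pvWins (g : Int → Int → Int) (l : List Int) (p : Nat) : List Int :=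
  (List.range (l.length + 1 - p)).map (fun i => pvNfold g ((l.drop i).take p))

theorem pvFold_comm (g : Int → Int → Int)
    (hassoc : ∀ a b c, g (g a b) c = g a (g b c))
    (t : List Int) (a b : Int) :
    t.foldl g (g a b) = g a (t.foldl g b) := by
  induction t generalizing b with
  | nil => rfl
  | cons c t ih => simp only [List.foldl_cons, hassoc]; exact ih (g b c)

theorem pvNfold_append (g : Int → Int → Int)
    (hassoc : ∀ a b c, g (g a b) c = g a (g b c))
    (w1 w2 : List Int) (h1 : w1 ≠ []) (h2 : w2 ≠ []) :
    pvNfold g (w1 ++ w2) = g (pvNfold g w1) (pvNfold g w2) := by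
  cases w1 with
  | nil => exact absurd rfl h1
  | cons x t =>
    cases w2 with
    | nil => exact absurd rfl h2
    | cons y t2 =>
      show (t ++ y :: t2).foldl g x = g (t.foldl g x) ((t2).foldl g y)
      rw [List.foldl_append, List.foldl_cons]
      exact pvFold_comm g hassoc t2 (t.foldl g x) y

theorem pvWindow_ne_nil (l : List Int) (i c : Nat) (hc : 1 ≤ c) (hi : i < l.length) :
    (l.drop i).take c ≠ [] := by
  have hlen : ((l.drop i).take c).length = min c (l.length - i) := by simp
  intro h
  rw [h] at hlen
  simp at hlen
  omega

-- windows split: l[i : i+(a+b)] = l[i : i+a] ++ l[i+a : i+a+b]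
theorem pvWindow_split (l : List Int) (i a b : Nat) :
    (l.drop i).take (a + b) = (l.drop i).take a ++ (l.drop (i + a)).take b := by
  rw [List.take_add, List.drop_drop]

-- overlapped combine: two p-windows at offset q (q ≤ p) fold to the (p+q)-window
theorem pvNfold_combine (g : Int → Int → Int)
    (hassoc : ∀ a b c, g (g a b) c = g a (g b c))
    (hidem : ∀ a, g a a = a)
    (l : List Int) (p q i : Nat) (hp : 1 ≤ p) (hq : q ≤ p) (hik : i + p + q ≤ l.length) :
    g (pvNfold g ((l.drop i).take p)) (pvNfold g ((l.drop (i + q)).take p))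
      = pvNfold g ((l.drop i).take (p + q)) := by
  rcases Nat.eq_zero_or_pos q with hq0 | hq1
  · subst hq0
    rw [Nat.add_zero, Nat.add_zero, hidem]
  · have hiL : i < l.length := by omega
    have hiqL : i + q < l.length := by omega
    have hsplit1 : (l.drop i).take (p + q) = (l.drop i).take q ++ (l.drop (i + q)).take p := by
      rw [Nat.add_comm p q]
      exact pvWindow_split l i q p
    rcases Nat.lt_or_ge q p with hqp | hqp
    · -- proper overlap: split both p-windows around the shared middle
      have hm : 1 ≤ p - q := by omega
      have hipL : i + p < l.length := by omega
      have hsplit2 : (l.drop i).take p = (l.drop i).take q ++ (l.drop (i + q)).take (p - q) := by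
        rw [show p = q + (p - q) by omega]
        rw [pvWindow_split l i q (p - q)]
        congr 2
        omega
      have hsplit3 : (l.drop (i + q)).take p
          = (l.drop (i + q)).take (p - q) ++ (l.drop (i + p)).take q := by
        rw [show p = (p - q) + q by omega]
        rw [pvWindow_split l (i + q) (p - q) q]
        congr 3
        · omega
        · omega
      have hA := pvWindow_ne_nil l i q hq1 hiL
      have hM := pvWindow_ne_nil l (i + q) (p - q) hm hiqL
      have hB := pvWindow_ne_nil l (i + p) q hq1 hipL
      rw [hsplit1, hsplit2, hsplit3,
        pvNfold_append g hassoc _ _ hA hM,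
        pvNfold_append g hassoc _ _ hM hB,
        pvNfold_append g hassoc _ _ hA (by simp [hM])]
      rw [pvNfold_append g hassoc _ _ hM hB, hassoc, ← hassoc (pvNfold g ((l.drop (i+q)).take (p-q)))
          (pvNfold g ((l.drop (i+q)).take (p-q))), hidem]
    · -- q = p: adjacent windows, plain append
      have hqp' : q = p := by omega
      subst hqp'
      have hA := pvWindow_ne_nil l i q hq1 hiL
      have hB := pvWindow_ne_nil l (i + q) q hq1 hiqL
      rw [hsplit1, pvNfold_append g hassoc _ _ hA hB]

-- one zip round turns the p-window list (offset q ≤ p) into the (p+q)-window list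
theorem pvWins_zip (g : Int → Int → Int)
    (hassoc : ∀ a b c, g (g a b) c = g a (g b c))
    (hidem : ∀ a, g a a = a)
    (l : List Int) (p q : Nat) (hp : 1 ≤ p) (hq : q ≤ p) :
    List.zipWith g (pvWins g l p) ((pvWins g l p).drop q) = pvWins g l (p + q) := by
  apply List.ext_getElem
  · simp [pvWins, List.length_zipWith]
    omega
  · intro i h1 h2
    have hi : i < l.length + 1 - (p + q) := by
      simp [pvWins, List.length_zipWith] at h1
      omega
    rw [List.getElem_zipWith, List.getElem_drop]
    unfold pvWins
    rw [List.getElem_map, List.getElem_map, List.getElem_map, List.getElem_range,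
      List.getElem_range, List.getElem_range]
    rw [show q + i = i + q by omega]
    exact pvNfold_combine g hassoc hidem l p q i hp hq (by omega)

theorem pvWins_one (l : List Int) (g : Int → Int → Int) : pvWins g l 1 = l := by
  apply List.ext_getElem
  · simp [pvWins]
  · intro i h1 h2
    unfold pvWins
    rw [List.getElem_map, List.getElem_range]
    rw [List.drop_eq_getElem_cons (by omega : i < l.length)]
    rfl

-- the doubling loop keeps maxs/mins as the p-window fold lists and exits with kk < 2*p
theorem pvGrow_spec (l : List Int) (kk : Nat) : ∀ (d p : Nat), kk - p ≤ d → 1 ≤ p → p ≤ kk →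
    ∃ P, pvGrow kk (pvWins max l p) (pvWins min l p) p = (pvWins max l P, pvWins min l P, P)
      ∧ 1 ≤ P ∧ P ≤ kk ∧ kk < 2 * P := by
  intro d
  induction d with
  | zero =>
    intro p hd hp hpk
    rw [pvGrow, dif_neg (by omega : ¬(2 * p ≤ kk ∧ 0 < p))]
    exact ⟨p, rfl, hp, hpk, by omega⟩
  | succ d ih =>
    intro p hd hp hpk
    by_cases h : 2 * p ≤ kk
    · rw [pvGrow, dif_pos ⟨h, by omega⟩]
      rw [pvWins_zip max (fun a b c => max_assoc a b c) (fun a => max_self a) l p p hp le_rfl,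
        pvWins_zip min (fun a b c => min_assoc a b c) (fun a => min_self a) l p p hp le_rfl]
      have h2 : p + p = 2 * p := by omega
      rw [h2]
      exact ih (2 * p) (by omega) (by omega) (by omega)
    · rw [pvGrow, dif_neg (by omega : ¬(2 * p ≤ kk ∧ 0 < p))]
      exact ⟨p, rfl, hp, hpk, by omega⟩

-- max?/min? of a nonempty list are its fold (Python max/min)
theorem pvMax?_nfold (w : List Int) (hw : w ≠ []) :
    (PySem.List.max? w (fun y => y)).getD 0 = pvNfold max w := by
  cases w with
  | nil => exact absurd rfl hw
  | cons x t => rw [PySem.List.max?_id_cons]; rfl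

theorem pvMin?_nfold (w : List Int) (hw : w ≠ []) :
    (PySem.List.min? w (fun y => y)).getD 0 = pvNfold min w := by
  cases w with
  | nil => exact absurd rfl hw
  | cons x t => rw [PySem.List.min?_id_cons]; rfl

-- A's loop as a sum over range
theorem pvFoldl_add_eq_sum {α : Type} (f : α → Int) (xs : List α) (init : Int) :
    xs.foldl (fun t s => t + f s) init = init + (xs.map f).sum := by
  induction xs generalizing init with
  | nil => simp
  | cons x t ih => simp [List.foldl_cons, ih]; ring

theorem max_and_min_spec_aux (array : List Int) (k : Int) (hk : 1 ≤ k) :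
    max_and_min_in_k_subarray array k = max_and_min_in_k_subarray_alt array k := by
  by_cases hkn : k > (array.length : Int)
  · -- k > n: no window; both sides are 0
    show (PySem.List.pyRange 0 ((array.length : Int) - k + 1) 1).foldl
      (fun temporary start => temporary
        + ((PySem.List.max? (PySem.List.slice array (some start) (some (start + k)))
            (fun y => y)).getD 0
          + (PySem.List.min? (PySem.List.slice array (some start) (some (start + k)))
            (fun y => y)).getD 0)) 0
      = max_and_min_in_k_subarray_alt array k
    rw [PySem.List.pyRange_one_eq_nil (by omega)]
    simp [max_and_min_in_k_subarray_alt, hkn]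
  · set L := array.length with hL
    set kk := k.toNat with hkk
    have hk1 : 1 ≤ kk := by omega
    have hkL : kk ≤ L := by omega
    have hkc : k = (kk : Int) := by omega
    have hA : max_and_min_in_k_subarray array k
        = ((pvWins max array kk).map (fun x => x)).sum + (pvWins min array kk).sum := by
      show (PySem.List.pyRange 0 ((L : Int) - k + 1) 1).foldl
        (fun temporary start => temporary
          + ((PySem.List.max? (PySem.List.slice array (some start) (some (start + k)))
              (fun y => y)).getD 0
            + (PySem.List.min? (PySem.List.slice array (some start) (some (start + k)))
              (fun y => y)).getD 0)) 0 = _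
      rw [PySem.List.pyRange_one, List.foldl_map, pvFoldl_add_eq_sum
        (fun j : Nat => (PySem.List.max? (PySem.List.slice array (some ((0 : Int) + (j : Nat)))
            (some ((0 : Int) + (j : Nat) + k))) (fun y => y)).getD 0
          + (PySem.List.min? (PySem.List.slice array (some ((0 : Int) + (j : Nat)))
            (some ((0 : Int) + (j : Nat) + k))) (fun y => y)).getD 0), zero_add]
      have hKK : ((L : Int) - k + 1 - 0).toNat = L + 1 - kk := by omega
      rw [hKK]
      have hterm : ∀ j ∈ List.range (L + 1 - kk),
          ((PySem.List.max? (PySem.List.slice array (some ((0 : Int) + (j : Nat)))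
              (some ((0 : Int) + (j : Nat) + k))) (fun y => y)).getD 0
            + (PySem.List.min? (PySem.List.slice array (some ((0 : Int) + (j : Nat)))
              (some ((0 : Int) + (j : Nat) + k))) (fun y => y)).getD 0)
          = pvNfold max ((array.drop j).take kk) + pvNfold min ((array.drop j).take kk) := by
        intro j hj
        rw [List.mem_range] at hj
        have h0 : (0 : Int) + (j : Nat) = (j : Int) := by omega
        have hsl : PySem.List.slice array (some (j : Int)) (some ((j : Int) + k))
            = (array.drop j).take kk := by
          rw [hkc]
          exact_mod_cast PySem.List.slice_natCast_add array j kk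
        have hne : (array.drop j).take kk ≠ [] := pvWindow_ne_nil array j kk hk1 (by omega)
        rw [h0, hsl, pvMax?_nfold _ hne, pvMin?_nfold _ hne]
      rw [List.map_congr_left hterm]
      rw [PySem.List.sum_map_add_int]
      unfold pvWins
      rw [List.map_map]
      rfl
    have hB : max_and_min_in_k_subarray_alt array k
        = ((pvWins max array kk).map (fun x => x)).sum + (pvWins min array kk).sum := by
      show (if k > (L : Int) then (0 : Int) else
        let r := pvGrow k.toNat array array 1
        let p := r.2.2
        let maxs := List.zipWith max r.1 (PySem.List.slice r.1 (some (k - (p : Int))) none)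
        let mins := List.zipWith min r.2.1 (PySem.List.slice r.2.1 (some (k - (p : Int))) none)
        maxs.sum + mins.sum) = _
      rw [if_neg hkn]
      obtain ⟨P, hgrow, hP1, hPk, hP2⟩ := pvGrow_spec array kk kk 1 (by omega) le_rfl hk1
      rw [pvWins_one array max, pvWins_one array min] at hgrow
      show (List.zipWith max (pvGrow k.toNat array array 1).1
          (PySem.List.slice (pvGrow k.toNat array array 1).1
            (some (k - (((pvGrow k.toNat array array 1).2.2) : Int))) none)).sum
        + (List.zipWith min (pvGrow k.toNat array array 1).2.1
          (PySem.List.slice (pvGrow k.toNat array array 1).2.1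
            (some (k - (((pvGrow k.toNat array array 1).2.2) : Int))) none)).sum = _
      rw [← hkk, hgrow]
      have hq0 : (0 : Int) ≤ k - (P : Int) := by omega
      rw [PySem.List.slice_from _ hq0, PySem.List.slice_from _ hq0]
      have hqn : (k - (P : Int)).toNat = kk - P := by omega
      rw [hqn]
      rw [pvWins_zip max (fun a b c => max_assoc a b c) (fun a => max_self a) array P (kk - P)
          hP1 (by omega),
        pvWins_zip min (fun a b c => min_assoc a b c) (fun a => min_self a) array P (kk - P)
          hP1 (by omega)]
      rw [show P + (kk - P) = kk by omega]
      simp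
    rw [hA, hB]

-- ===== VERDICT (by name: the statement is the Claim_ definition above) =====
theorem max_and_min_in_k_subarray_spec : Claim_equal_max_and_min_in_k_subarray := by
  intro array k _ hpre
  unfold Spec_max_and_min_in_k_subarray
  exact max_and_min_spec_aux array k hpre
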